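-- pv_equiv track=rewrite | github.com/noxtgm/epreuves-pratiques-nsi-2024 | sujets/24_NSI_05.py | nombre_points_rupture
-- ===== SOURCE A (Python) =====
-- def nombre_points_rupture(ordre):
--     '''
--     Renvoie le nombre de point de rupture de ordre qui représente
--     un ordre de gènes de chromosome
--     '''
--     # on vérifie que ordre est un ordre de gènes
--     assert ...
--     n = len(ordre)
--     nb = 0
--     if ordre[0] != 1: # le premier n'est pas 1
--         nb = nb + 1
--     i = 0
--     while i < n-1:
--         if ordre[i]-ordre[i+1] not in [-1, 1]: # l'écart n'est pas 1
--             nb = nb + 1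
--         i = i + 1
--     if ordre[i] != n: # le dernier n'est pas n
--         nb = nb + 1
--     return nb
-- ===== SOURCE B (Python) =====
-- def nombre_points_rupture(ordre):
--     '''
--     Renvoie le nombre de point de rupture de ordre qui représente
--     un ordre de gènes de chromosome
--     '''
--     n = len(ordre)
--     diffs = [b - a for a, b in zip(ordre, ordre[1:])]
--     conserved = diffs.count(1) + diffs.count(-1) + (ordre[0] == 1) + (ordre[-1] == n)
--     return n + 1 - conserved
-- ===== Notes on version B (the rewrite author's own statement) =====
-- stated objective: alternative
-- what changed: B counts the complement: it builds a difference list once, counts conserved adjacencies with two list.count passes plus two endpoint equality checks, and returns n+1 minus that total, instead of A's single index-driven while loop that directly increments a breakpoint counter per adjacent pair and endpoint.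
import Mathlib
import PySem

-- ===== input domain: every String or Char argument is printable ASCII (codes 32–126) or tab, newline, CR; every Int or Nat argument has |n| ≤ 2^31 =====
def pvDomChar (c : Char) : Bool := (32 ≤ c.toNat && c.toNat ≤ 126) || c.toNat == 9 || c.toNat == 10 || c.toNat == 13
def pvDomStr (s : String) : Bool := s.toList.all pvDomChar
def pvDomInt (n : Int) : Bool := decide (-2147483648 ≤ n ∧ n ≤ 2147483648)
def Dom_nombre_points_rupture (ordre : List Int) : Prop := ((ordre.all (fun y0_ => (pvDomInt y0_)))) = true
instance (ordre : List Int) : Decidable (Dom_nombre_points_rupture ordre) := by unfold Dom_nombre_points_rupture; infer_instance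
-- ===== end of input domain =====

-- B counts the complement (conserved adjacencies, via a difference list built once and
-- two list.count passes plus two endpoint equality checks) and returns n+1 minus it,
-- instead of A's single index-driven while loop counting breakpoints directly (objective: alternative).

-- ===== PORT A =====
-- the while loop of A: state (nb, i), runs while i < n - 1
def nprWhile (ordre : List Int) (n : Int) (nb : Int) (i : Int) : Int × Int :=
  if i < n - 1 then
    nprWhile ordre n
      (if ¬ ((PySem.List.pyGetD ordre i 0 - PySem.List.pyGetD ordre (i+1) 0) ∈ ([-1, 1] : List Int))
        then nb + 1 else nb)
      (i + 1)
  else (nb, i)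
termination_by (n - 1 - i).toNat
decreasing_by omega

def nombre_points_rupture (ordre : List Int) : Int :=
  let n : Int := ordre.length
  let nb : Int := 0
  let nb := if PySem.List.pyGetD ordre 0 0 ≠ 1 then nb + 1 else nb
  let (nb, i) := nprWhile ordre n nb 0
  if PySem.List.pyGetD ordre i 0 ≠ n then nb + 1 else nb

-- ===== PORT B =====
def nombre_points_rupture_alt (ordre : List Int) : Int :=
  let n : Int := ordre.length
  let diffs := (ordre.zip (PySem.List.slice ordre (some 1) none)).map (fun p => p.2 - p.1)
  let conserved : Int :=
    (PySem.List.count diffs 1 : Int) + (PySem.List.count diffs (-1) : Int)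
      + (if PySem.List.pyGetD ordre 0 0 = 1 then 1 else 0)
      + (if PySem.List.pyGetD ordre (-1) 0 = n then 1 else 0)
  n + 1 - conserved

-- ===== PRECONDITION & SPEC =====
-- Pre_: A raises IndexError (ordre[0]) on the empty list; excluded (B raises there too).
def Pre_nombre_points_rupture (ordre : List Int) : Prop := ordre ≠ []
instance (ordre : List Int) : Decidable (Pre_nombre_points_rupture ordre) := by unfold Pre_nombre_points_rupture; infer_instance
def pvWitness_nombre_points_rupture : List Int := [2, 3, 1]

def Spec_nombre_points_rupture (ordre : List Int) (out : Int) : Prop := out = nombre_points_rupture_alt ordre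
instance (ordre : List Int) (out : Int) : Decidable (Spec_nombre_points_rupture ordre out) := by unfold Spec_nombre_points_rupture; infer_instance

-- ===== CLAIM (what is proved, stated in full; the proofs are below) =====
def Claim_equal_nombre_points_rupture : Prop := ∀ (ordre : List Int), Dom_nombre_points_rupture ordre → Pre_nombre_points_rupture ordre → Spec_nombre_points_rupture ordre (nombre_points_rupture ordre)

-- ===== LEMMAS AND PROOFS =====

-- A's middle count (the while loop's total), as a function of the list
def zcount (ys : List Int) : Int :=
  (ys.zip ys.tail).foldl (fun acc p => acc + if (p.1 - p.2).natAbs ≠ 1 then 1 else 0) 0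

theorem zcount_cons_cons (a b : Int) (t : List Int) :
    zcount (a :: b :: t) = (if (a - b).natAbs ≠ 1 then 1 else 0) + zcount (b :: t) := by
  simp only [zcount, List.zip, List.tail, List.zipWith, List.foldl]
  rw [PySem.List.foldl_add, PySem.List.foldl_add]
  ring

-- the while loop, started at index k < n, adds zcount of the suffix and exits with i = n - 1
theorem nprWhile_eq (ordre : List Int) (k : Nat) (nb : Int) (hk : k < ordre.length) :
    nprWhile ordre ordre.length nb k = (nb + zcount (ordre.drop k), (ordre.length : Int) - 1) := by
  induction' hm : ordre.length - 1 - k with m ih generalizing k nb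
  · -- k = length - 1 : loop exits immediately
    have hk' : k = ordre.length - 1 := by omega
    rw [nprWhile]
    have : ¬ ((k : Int) < (ordre.length : Int) - 1) := by omega
    rw [if_neg this]
    have hdrop : ordre.drop k = [ordre[k]] := by
      rw [List.drop_eq_getElem_cons hk]
      have : ordre.drop (k + 1) = [] := by
        rw [List.drop_eq_nil_iff]; omega
      rw [this]
    simp [hdrop, zcount]
    omega
  · -- k < length - 1 : one step
    have hlt : (k : Int) < (ordre.length : Int) - 1 := by omega
    rw [nprWhile, if_pos hlt]
    have hk1 : k + 1 < ordre.length := by omega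
    have e1 : PySem.List.pyGetD ordre (k : Int) 0 = ordre[k] := by
      rw [PySem.List.pyGetD_natCast]; exact List.getD_eq_getElem _ _ hk
    have e2 : PySem.List.pyGetD ordre (((k + 1 : Nat) : Int)) 0 = ordre[k+1] := by
      rw [PySem.List.pyGetD_natCast]; exact List.getD_eq_getElem _ _ hk1
    have hcast : ((k : Int) + 1) = ((k + 1 : Nat) : Int) := by push_cast; ring
    rw [hcast]
    rw [ih (k + 1) _ hk1 (by omega)]
    have hdrop : ordre.drop k = ordre[k] :: ordre[k+1] :: ordre.drop (k + 2) := by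
      rw [List.drop_eq_getElem_cons hk, List.drop_eq_getElem_cons hk1]
    have hdrop1 : ordre.drop (k + 1) = ordre[k+1] :: ordre.drop (k + 2) := by
      rw [List.drop_eq_getElem_cons hk1]
    rw [hdrop, hdrop1, zcount_cons_cons, e1, e2]
    have hiff : ((ordre[k] - ordre[k+1]) ∈ ([-1, 1] : List Int)) ↔ (ordre[k] - ordre[k+1]).natAbs = 1 := by
      simp [List.mem_cons]; omega
    simp only [Prod.mk.injEq, and_true]
    generalize zcount (ordre[k+1] :: ordre.drop (k + 2)) = z
    by_cases h : (ordre[k] - ordre[k+1]).natAbs = 1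
    · rw [if_neg (by simpa [hiff] using h), if_neg (by simpa using h)]; ring
    · rw [if_pos (by simpa [hiff] using h), if_pos (by simpa using h)]; ring

-- B's difference list of a (suffix of the) list
def dfs (ys : List Int) : List Int := (ys.zip ys.tail).map (fun p => p.2 - p.1)

-- complement identity: A's middle breakpoint count plus B's two adjacency counts
-- exhaust the length-1 adjacent pairs
theorem zcount_add_counts (ys : List Int) (h : ys ≠ []) :
    zcount ys + ((dfs ys).count 1 : Int) + ((dfs ys).count (-1) : Int) = (ys.length : Int) - 1 := by
  induction ys with
  | nil => exact absurd rfl h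
  | cons a t ih =>
    cases t with
    | nil => simp [zcount, dfs]
    | cons b t' =>
      have hdfs : dfs (a :: b :: t') = (b - a) :: dfs (b :: t') := by
        simp [dfs, List.zip]
      rw [zcount_cons_cons, hdfs]
      have ht := ih (by simp)
      simp only [List.count_cons, List.length_cons] at *
      by_cases h1 : (a - b).natAbs = 1
      · have h2 : b - a = 1 ∨ b - a = -1 := by omega
        rcases h2 with h2 | h2 <;> simp [h1, h2] <;> omega
      · have h2 : ¬ (b - a = 1) ∧ ¬ (b - a = -1) := by omega
        simp [h1, h2.1, h2.2]
        omega

theorem last_getD (ordre : List Int) (h : ordre ≠ []) :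
    PySem.List.pyGetD ordre ((ordre.length : Int) - 1) 0 = PySem.List.pyGetD ordre (-1) 0 := by
  have hlen : 0 < ordre.length := List.length_pos_iff.mpr h
  have e : ((ordre.length : Int) - 1) = ((ordre.length - 1 : Nat) : Int) := by omega
  rw [e, PySem.List.pyGetD_natCast, PySem.List.pyGetD_neg_one (h := h)]
  rw [List.getD_eq_getElem _ _ (by omega), List.getLast_eq_getElem]

-- ===== VERDICT (by name: the statement is the Claim_ definition above) =====
theorem nombre_points_rupture_spec : Claim_equal_nombre_points_rupture := by
  intro ordre _ hpre
  have hlen : 0 < ordre.length := List.length_pos_iff.mpr hpre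
  unfold Spec_nombre_points_rupture nombre_points_rupture nombre_points_rupture_alt
  dsimp only
  have hw := nprWhile_eq ordre 0 (if PySem.List.pyGetD ordre 0 0 ≠ 1 then (0 : Int) + 1 else 0) hlen
  rw [Nat.cast_zero, List.drop_zero] at hw
  rw [hw]
  dsimp only
  rw [last_getD ordre hpre]
  rw [PySem.List.slice_from_one, PySem.List.count_eq, PySem.List.count_eq]
  have hz := zcount_add_counts ordre hpre
  rw [show ((ordre.zip ordre.tail).map (fun p => p.2 - p.1)) = dfs ordre from rfl]
  split_ifs <;> omega
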